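-- pv_equiv track=rewrite | github.com/bcrowe306/MPC-Studio-Mk2-Midi-Sysex-Charts | python-lcd-poc/lib/pythonbmp/textgraphics.py | plot8bitpatternastext
-- ===== SOURCE A (Python) =====
-- def plot8bitpatternastext(
--         bitpattern: list[int],
--         onechar: str,
--         zerochar: str):
--     """Outputs the bits of a list
--         of bytes to console
--
--     Args:
--         bitpattern: list of bytes
--         onechar   : char to display
--                     if bit is 1
--         zerochar : char to display
--                     if bit is 0
--
--     Returns:
--         console output
--     """
--     s = ""
--     for bits in bitpattern:
--         mask = 128
--         while mask > 0:
--             s += onechar if mask & bits > 0 else zerochar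
--             mask >>= 1
--         s += '\n'
--     return s
-- ===== SOURCE B (Python) =====
-- def plot8bitpatternastext(
--         bitpattern: list[int],
--         onechar: str,
--         zerochar: str):
--     """Outputs the bits of a list of bytes as text, one byte per line."""
--     table = {48: zerochar, 49: onechar}
--     return ''.join(format(bits & 0xFF, '08b').translate(table) + '\n'
--                    for bits in bitpattern)
-- ===== Notes on version B (the rewrite author's own statement) =====
-- stated objective: idiomatic
-- what changed: Replaces the 128-mask shifting inner while-loop and character-by-character string concatenation with format(bits & 0xFF, '08b') plus a str.translate table mapping '0'/'1' to zerochar/onechar, joined per byte.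
import Mathlib
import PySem

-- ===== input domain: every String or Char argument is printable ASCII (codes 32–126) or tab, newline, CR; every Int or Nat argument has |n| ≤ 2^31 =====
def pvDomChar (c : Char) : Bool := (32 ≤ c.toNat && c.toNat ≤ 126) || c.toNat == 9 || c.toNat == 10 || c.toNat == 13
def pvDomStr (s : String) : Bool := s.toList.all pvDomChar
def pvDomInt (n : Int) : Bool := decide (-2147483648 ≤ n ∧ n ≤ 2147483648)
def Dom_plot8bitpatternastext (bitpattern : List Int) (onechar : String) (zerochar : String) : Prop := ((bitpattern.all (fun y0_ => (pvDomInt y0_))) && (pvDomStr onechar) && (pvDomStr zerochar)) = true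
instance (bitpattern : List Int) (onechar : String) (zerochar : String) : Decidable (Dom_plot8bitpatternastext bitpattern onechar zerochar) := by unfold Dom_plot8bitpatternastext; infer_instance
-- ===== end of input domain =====

-- B renders each byte's line by formatting (bits & 0xFF) as an 8-digit binary string and
-- translating '0'/'1' to zerochar/onechar (more idiomatic than A's mask-shifting inner loop).

-- ===== PORT A =====
-- the inner `while mask > 0` loop of A
def plotWhile (bits : Int) (onechar zerochar : String) (mask : Int) (s : String) : String :=
  if 0 < mask then
    plotWhile bits onechar zerochar (PySem.Int.floordiv mask 2)
      (s ++ (if 0 < PySem.Int.band mask bits then onechar else zerochar))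
  else s
termination_by mask.toNat
decreasing_by
  rename_i h
  have : PySem.Int.floordiv mask 2 = mask / 2 := Int.fdiv_eq_ediv_of_nonneg _ (by omega)
  rw [this]; omega

def plot8bitpatternastext (bitpattern : List Int) (onechar : String) (zerochar : String) : String :=
  bitpattern.foldl (fun s bits => plotWhile bits onechar zerochar 128 s ++ "\n") ""

-- ===== PORT B =====
-- exact port of Python's format(n, '08b') for 0 ≤ n < 256: the 8 binary digits, MSB first
def fmt08b (n : Nat) : List Char :=
  (List.range 8).map (fun k => if n.testBit (7 - k) then '1' else '0')

-- the translate table {48: zerochar, 49: onechar} applied to one digit character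
def translate1 (onechar zerochar : String) (c : Char) : List Char :=
  if c = '1' then onechar.toList else zerochar.toList

def plot8bitpatternastext_alt (bitpattern : List Int) (onechar : String) (zerochar : String) : String :=
  String.join (bitpattern.map (fun bits =>
    String.ofList ((fmt08b (PySem.Int.band bits 255).toNat).flatMap (translate1 onechar zerochar)) ++ "\n"))

-- ===== PRECONDITION & SPEC =====
def Spec_plot8bitpatternastext (bitpattern : List Int) (onechar : String) (zerochar : String) (out : String) : Prop := out = plot8bitpatternastext_alt bitpattern onechar zerochar
instance (bitpattern : List Int) (onechar : String) (zerochar : String) (out : String) : Decidable (Spec_plot8bitpatternastext bitpattern onechar zerochar out) := by unfold Spec_plot8bitpatternastext; infer_instance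

-- ===== CLAIM (what is proved, stated in full; the proofs are below) =====
def Claim_equal_plot8bitpatternastext : Prop := ∀ (bitpattern : List Int) (onechar : String) (zerochar : String), Dom_plot8bitpatternastext bitpattern onechar zerochar → Spec_plot8bitpatternastext bitpattern onechar zerochar (plot8bitpatternastext bitpattern onechar zerochar)

-- ===== LEMMAS AND PROOFS =====

set_option maxRecDepth 100000 in
lemma sub_mod_testBit : ∀ (x : Fin 256) (j : Fin 8),
    ((255 - x.val).testBit j.val) = !(x.val.testBit j.val) := by decide

lemma band_pow_pos (bits : Int) (j : Nat) (hj : j < 8) :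
    (0 < PySem.Int.band (2 ^ j) bits) ↔ (PySem.Int.band bits 255).toNat.testBit j = true := by
  have hp : ((2:Int) ^ j) = ((2 ^ j : Nat) : Int) := by push_cast; ring
  have h255 : (255:Nat) = 2 ^ 8 - 1 := by norm_num
  rcases (by omega : 0 ≤ bits ∨ bits < 0) with hb | hb
  · unfold PySem.Int.band
    rw [hp, if_pos (by positivity), if_pos hb, if_pos hb, if_pos (by norm_num : (0:Int) ≤ 255)]
    simp only [Int.toNat_natCast, Int.natCast_pos]
    rw [Nat.land_comm, Nat.and_two_pow]
    rw [show ((255:Int).toNat = 255) from rfl, h255, Nat.and_two_pow_sub_one_eq_mod,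
      Nat.testBit_mod_two_pow]
    cases htb : bits.toNat.testBit j <;> simp [hj]
  · unfold PySem.Int.band
    rw [hp, if_pos (by positivity), if_neg (by omega), if_neg (by omega), if_pos (by norm_num : (0:Int) ≤ 255)]
    simp only [Int.toNat_natCast, Int.natCast_pos]
    set k := (-bits - 1).toNat with hk
    rw [Nat.land_comm, Nat.and_two_pow]
    rw [show ((255:Int).toNat = 255) from rfl, Nat.land_comm, h255, Nat.and_two_pow_sub_one_eq_mod]
    have hx : k % 2 ^ 8 < 256 := Nat.mod_lt _ (by norm_num)
    have := sub_mod_testBit ⟨k % 2 ^ 8, hx⟩ ⟨j, hj⟩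
    simp only [h255] at this ⊢
    rw [this, Nat.testBit_mod_two_pow]
    cases htb : k.testBit j <;> simp [hj]

-- A's inner loop produces exactly B's translated format line
-- A's inner loop produces exactly B's translated format line
lemma plotWhile_eq (bits : Int) (one zero s : String) :
    plotWhile bits one zero 128 s
      = s ++ String.ofList ((fmt08b (PySem.Int.band bits 255).toNat).flatMap (translate1 one zero)) := by
  have h7 := band_pow_pos bits 7 (by norm_num)
  have h6 := band_pow_pos bits 6 (by norm_num)
  have h5 := band_pow_pos bits 5 (by norm_num)
  have h4 := band_pow_pos bits 4 (by norm_num)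
  have h3 := band_pow_pos bits 3 (by norm_num)
  have h2 := band_pow_pos bits 2 (by norm_num)
  have h1 := band_pow_pos bits 1 (by norm_num)
  have h0 := band_pow_pos bits 0 (by norm_num)
  norm_num at h7 h6 h5 h4 h3 h2 h1 h0
  simp [plotWhile, PySem.Int.floordiv, Int.fdiv, h7, h6, h5, h4, h3, h2, h1, h0,
    fmt08b, List.range_succ, translate1, ← String.toList_inj, apply_ite String.toList]

lemma fold_eq (l : List Int) (one zero : String) (s : String) :
    l.foldl (fun s bits => plotWhile bits one zero 128 s ++ "\n") s
      = s ++ String.join (l.map (fun bits =>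
          String.ofList ((fmt08b (PySem.Int.band bits 255).toNat).flatMap (translate1 one zero)) ++ "\n")) := by
  induction l generalizing s with
  | nil => simp [String.join]
  | cons b t ih =>
    simp only [List.foldl_cons, List.map_cons]
    rw [ih, plotWhile_eq, ← String.toList_inj]
    simp [String.toList_join]

-- ===== VERDICT (by name: the statement is the Claim_ definition above) =====
theorem plot8bitpatternastext_spec : Claim_equal_plot8bitpatternastext := by
  intro bp one zero _
  unfold Spec_plot8bitpatternastext plot8bitpatternastext plot8bitpatternastext_alt
  rw [fold_eq]
  rw [← String.toList_inj]
  simp [String.toList_join]
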